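-- pv_equiv track=rewrite | github.com/jamesross2/random_graph | src/random_graph/utils/checks.py | valid_bipartite_graph
-- ===== SOURCE A (Python) =====
-- import typing
--
-- def valid_bipartite_graph(nx: int, ny: int, edges: typing.List[typing.Tuple[int, int]]) -> bool:
--     """Check whether given graph arguments are valid.
--
--     This function performs basic argument validation on inputs. It is not a test for whether such a graph exists. This
--     basically checks that the edges are compatible with the other arguments (rather than checking that a degree sequence
--     is graphical).
--
--     Args:
--         nx: Number of vertices in X.
--         ny: Number of vertices in Y.
--         edges: A list of edges in the graph.
--
--     Returns:
--         True if the arguments are valid.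
--     """
--     # check that arguments are valid
--     if nx < 0 or ny < 0:
--         return False
--
--     edges = list(edges)
--     if len(set(edges)) < len(edges):
--         return False
--
--     edges_valid_nodes = [x < nx and y < ny for (x, y) in edges]
--     if not all(edges_valid_nodes):
--         return False
--
--     # if nothing failed, then we are done
--     return True
-- ===== SOURCE B (Python) =====
-- def valid_bipartite_graph(nx: int, ny: int, edges) -> bool:
--     """Sort-and-scan: after sorting, duplicate edges are adjacent; the bound
--     checks reduce to comparing the coordinate maxima against nx and ny."""
--     if nx < 0 or ny < 0:
--         return False
--     if not edges:
--         return True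
--     es = sorted(edges)
--     if any(a == b for a, b in zip(es, es[1:])):
--         return False
--     return max(e[0] for e in edges) < nx and max(e[1] for e in edges) < ny
-- ===== Notes on version B (the rewrite author's own statement) =====
-- stated objective: alternative
-- what changed: Replaces A's hash-set cardinality duplicate test and per-edge boolean list with a sort-then-adjacent-scan for duplicates and a comparison of the coordinate maxima against nx/ny.
import Mathlib
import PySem

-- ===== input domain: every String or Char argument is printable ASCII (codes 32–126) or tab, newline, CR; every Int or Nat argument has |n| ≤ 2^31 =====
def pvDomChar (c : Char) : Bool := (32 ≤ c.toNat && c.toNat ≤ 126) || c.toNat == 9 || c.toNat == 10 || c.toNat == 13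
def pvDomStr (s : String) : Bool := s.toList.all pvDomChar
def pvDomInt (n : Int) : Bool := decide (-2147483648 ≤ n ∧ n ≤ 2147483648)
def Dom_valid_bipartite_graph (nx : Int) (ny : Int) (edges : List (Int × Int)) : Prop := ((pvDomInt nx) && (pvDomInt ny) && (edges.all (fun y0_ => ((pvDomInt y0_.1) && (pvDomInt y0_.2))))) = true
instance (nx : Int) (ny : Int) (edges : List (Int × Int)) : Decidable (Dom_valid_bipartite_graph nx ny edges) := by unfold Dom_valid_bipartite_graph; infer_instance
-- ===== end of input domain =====

-- B replaces A's hash-set cardinality duplicate test and per-edge boolean list by a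
-- sort-then-adjacent-scan for duplicates plus a comparison of the coordinate maxima
-- against nx/ny (objective: alternative algorithm, same return value everywhere).

-- ===== PORT A =====
def valid_bipartite_graph (nx : Int) (ny : Int) (edges : List (Int × Int)) : Bool :=
  if nx < 0 || ny < 0 then false
  else if (PySem.Set.ofList edges).length < edges.length then false
  else
    let edges_valid_nodes := edges.map (fun p => decide (p.1 < nx) && decide (p.2 < ny))
    if !(edges_valid_nodes.all (fun b => b)) then false
    else true

-- ===== PORT B =====
def valid_bipartite_graph_alt (nx : Int) (ny : Int) (edges : List (Int × Int)) : Bool :=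
  if nx < 0 || ny < 0 then false
  else if edges.isEmpty then true
  else
    let es := PySem.List.sorted2 edges Prod.fst Prod.snd
    if (es.zip (es.drop 1)).any (fun p => p.1 == p.2) then false
    else
      -- max(e[0] for e in edges) / max(e[1] for e in edges); the generators are nonempty here,
      -- so the `none` branch of `max?` is unreachable (Python's max never raises in B)
      match PySem.List.max? (edges.map (fun e => e.1)) (fun v => v),
            PySem.List.max? (edges.map (fun e => e.2)) (fun v => v) with
      | some mx, some my => decide (mx < nx) && decide (my < ny)
      | _, _ => false

-- ===== PRECONDITION & SPEC =====
def Spec_valid_bipartite_graph (nx : Int) (ny : Int) (edges : List (Int × Int)) (out : Bool) : Prop := out = valid_bipartite_graph_alt nx ny edges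
instance (nx : Int) (ny : Int) (edges : List (Int × Int)) (out : Bool) : Decidable (Spec_valid_bipartite_graph nx ny edges out) := by unfold Spec_valid_bipartite_graph; infer_instance

-- ===== CLAIM (what is proved, stated in full; the proofs are below) =====
def Claim_equal_valid_bipartite_graph : Prop := ∀ (nx : Int) (ny : Int) (edges : List (Int × Int)), Dom_valid_bipartite_graph nx ny edges → Spec_valid_bipartite_graph nx ny edges (valid_bipartite_graph nx ny edges)

-- ===== LEMMAS AND PROOFS =====

-- ---- A side: set(edges) cardinality drop <=> a duplicate edge ----

-- foldl over Set.add never grows the set past (initial + processed) elements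
lemma foldl_add_length_le (xs : List (Int × Int)) (s : PySem.Set (Int × Int)) :
    (xs.foldl PySem.Set.add s).length ≤ xs.length + s.length := by
  induction xs generalizing s with
  | nil => simp
  | cons x xs ih =>
    simp only [List.foldl_cons]
    calc (xs.foldl PySem.Set.add (PySem.Set.add s x)).length
        ≤ xs.length + (PySem.Set.add s x).length := ih _
      _ ≤ (x :: xs).length + s.length := by
          simp only [PySem.Set.add, PySem.Set.contains]
          split
          · simp
          · simp only [List.length_append, List.length_cons, List.length_nil]; omega

-- the set reaches full size exactly when the processed elements are distinct and new
lemma foldl_add_length_eq_iff (xs : List (Int × Int)) (s : PySem.Set (Int × Int)) :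
    (xs.foldl PySem.Set.add s).length = xs.length + s.length ↔
      xs.Nodup ∧ ∀ x ∈ xs, x ∉ s := by
  induction xs generalizing s with
  | nil => simp
  | cons x xs ih =>
    simp only [List.foldl_cons, PySem.Set.add, PySem.Set.contains]
    by_cases hx : x ∈ s
    · rw [if_pos (by simpa [List.contains_iff_mem] using hx)]
      have hle := foldl_add_length_le xs s
      simp only [List.length_cons]
      constructor
      · intro h; omega
      · rintro ⟨-, hall⟩; exact absurd hx (hall x (by simp))
    · rw [if_neg (by simpa [List.contains_iff_mem] using hx)]
      have hlen : (x :: xs).length + s.length = xs.length + (s ++ [x]).length := by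
        simp; omega
      rw [hlen, ih (s ++ [x])]
      constructor
      · rintro ⟨hnd, hall⟩
        have hxs : x ∉ xs := fun hmem => by simpa using hall x hmem
        refine ⟨List.nodup_cons.mpr ⟨hxs, hnd⟩, ?_⟩
        intro y hy
        rcases List.mem_cons.mp hy with rfl | hy
        · exact hx
        · intro hys; exact (by simpa using hall y hy : y ∉ s ∧ ¬ y = x).1 hys
      · rintro ⟨hnd, hall⟩
        obtain ⟨hxs, hnd⟩ := List.nodup_cons.mp hnd
        refine ⟨hnd, fun y hy => ?_⟩
        simp only [List.mem_append, List.mem_singleton, not_or]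
        exact ⟨hall y (List.mem_cons_of_mem _ hy), fun h => hxs (h ▸ hy)⟩

lemma ofList_length_lt_iff (xs : List (Int × Int)) :
    (PySem.Set.ofList xs).length < xs.length ↔ ¬ xs.Nodup := by
  have h1 : PySem.Set.ofList xs = xs.foldl PySem.Set.add [] := PySem.Set.ofList_eq_foldl xs
  have hle := foldl_add_length_le xs []
  have heq := foldl_add_length_eq_iff xs []
  simp only [List.length_nil, Nat.add_zero, List.not_mem_nil] at hle heq
  rw [h1]
  constructor
  · intro hlt hnd
    have := heq.mpr ⟨hnd, fun x _ => not_false⟩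
    omega
  · intro hnd
    rcases Nat.lt_or_ge (xs.foldl PySem.Set.add []).length xs.length with h | h
    · exact h
    · exact absurd (heq.mp (by omega)).1 hnd

lemma valid_bipartite_graph_eq_true_iff (nx ny : Int) (edges : List (Int × Int)) :
    valid_bipartite_graph nx ny edges = true ↔
      ¬(nx < 0 ∨ ny < 0) ∧ edges.Nodup ∧ ∀ e ∈ edges, e.1 < nx ∧ e.2 < ny := by
  unfold valid_bipartite_graph
  by_cases hneg : (nx < 0 || ny < 0) = true
  · rw [if_pos hneg]
    simp only [Bool.or_eq_true, decide_eq_true_eq] at hneg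
    simp [hneg]
  · rw [if_neg hneg]
    simp only [Bool.or_eq_true, decide_eq_true_eq] at hneg
    push Not at hneg
    by_cases hdup : (PySem.Set.ofList edges).length < edges.length
    · rw [if_pos hdup]
      simp only [Bool.false_eq_true, false_iff, not_and]
      intro _ hnd _
      exact (ofList_length_lt_iff edges).mp hdup hnd
    · rw [if_neg hdup]
      show (if !((edges.map (fun p => decide (p.1 < nx) && decide (p.2 < ny))).all (fun b => b)) then false else true) = true ↔ _
      cases hval : (edges.map (fun p => decide (p.1 < nx) && decide (p.2 < ny))).all (fun b => b)
      · simp only [Bool.not_false, if_true, Bool.false_eq_true, false_iff, not_and]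
        simp only [List.all_eq_false, List.mem_map] at hval
        obtain ⟨b, ⟨e, he, rfl⟩, hb⟩ := hval
        simp at hb
        intro _ _ hval'
        have := hval' e he
        omega
      · rw [show (if (!true) = true then false else true) = true from rfl]
        simp only [true_iff]
        refine ⟨by omega, not_not.mp (fun hnd => hdup ((ofList_length_lt_iff edges).mpr hnd)), ?_⟩
        simp only [List.all_eq_true, List.mem_map, forall_exists_index, and_imp] at hval
        intro e he
        have h := hval (decide (e.1 < nx) && decide (e.2 < ny)) e he rfl
        simp only [Bool.and_eq_true, decide_eq_true_eq] at h
        exact h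

-- ---- B side: the lexicographic insertion order sorted2 uses ----

def lexB (a b : Int × Int) : Bool :=
  decide (a.1 < b.1) || (!decide (b.1 < a.1) && decide (a.2 < b.2))

lemma sorted2_eq_foldl (edges : List (Int × Int)) :
    PySem.List.sorted2 edges Prod.fst Prod.snd =
      edges.foldl (fun acc x => PySem.List.insertBy lexB x acc) [] := rfl

lemma lexB_iff (a b : Int × Int) :
    lexB a b = true ↔ (a.1 < b.1 ∨ (¬ b.1 < a.1 ∧ a.2 < b.2)) := by
  simp [lexB]

lemma lexB_irrefl (a : Int × Int) : lexB a a = false := by simp [lexB]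

lemma lexB_trans {a b c : Int × Int} (h1 : lexB a b = true) (h2 : lexB b c = true) :
    lexB a c = true := by
  rw [lexB_iff] at *; omega

lemma lexB_asymm {a b : Int × Int} (h : lexB a b = true) : lexB b a = false := by
  rw [Bool.eq_false_iff]
  intro hb
  rw [lexB_iff] at *
  omega

lemma lexB_total {a b : Int × Int} (h : lexB b a = false) (hne : a ≠ b) : lexB a b = true := by
  have hb : ¬ lexB b a = true := by simp [h]
  rw [lexB_iff] at hb ⊢
  have : ¬ (b.1 = a.1 ∧ b.2 = a.2) := fun hh => hne (Prod.ext hh.1.symm hh.2.symm)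
  omega

lemma pairwise_insertBy (x : Int × Int) (ys : List (Int × Int))
    (h : ys.Pairwise (fun a b => lexB b a = false)) :
    (PySem.List.insertBy lexB x ys).Pairwise (fun a b => lexB b a = false) := by
  induction ys with
  | nil => simp [PySem.List.insertBy]
  | cons y ys ih =>
    rcases List.pairwise_cons.mp h with ⟨hy, hys⟩
    by_cases hxy : lexB x y = true
    · rw [show PySem.List.insertBy lexB x (y :: ys) = x :: y :: ys by
        simp [PySem.List.insertBy, hxy]]
      refine List.pairwise_cons.mpr ⟨?_, h⟩
      intro z hz
      rcases List.mem_cons.mp hz with rfl | hz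
      · exact lexB_asymm hxy
      · by_contra hzx
        have hzx' : lexB z x = true := by
          cases hb : lexB z x
          · exact absurd hb hzx
          · rfl
        have := lexB_trans hzx' hxy
        rw [hy z hz] at this
        exact Bool.false_ne_true this
    · have hxy' : lexB x y = false := by
        cases hb : lexB x y
        · rfl
        · exact absurd hb hxy
      rw [show PySem.List.insertBy lexB x (y :: ys) = y :: PySem.List.insertBy lexB x ys by
        simp [PySem.List.insertBy, hxy']]
      refine List.pairwise_cons.mpr ⟨?_, ih hys⟩
      intro z hz
      rcases (PySem.List.mem_insertBy lexB x z ys).mp hz with rfl | hz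
      · exact hxy'
      · exact hy z hz

lemma pairwise_foldl_insertBy (xs : List (Int × Int)) (acc : List (Int × Int))
    (h : acc.Pairwise (fun a b => lexB b a = false)) :
    (xs.foldl (fun a x => PySem.List.insertBy lexB x a) acc).Pairwise
      (fun a b => lexB b a = false) := by
  induction xs generalizing acc with
  | nil => exact h
  | cons x xs ih => exact ih _ (pairwise_insertBy x acc h)

-- the adjacent-equality scan is exactly IsChain (· ≠ ·)
lemma zip_any_eq_false_iff_isChain (es : List (Int × Int)) :
    ((es.zip (es.drop 1)).any (fun p => p.1 == p.2)) = false ↔ es.IsChain (· ≠ ·) := by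
  induction es with
  | nil => simp
  | cons a es ih =>
    cases es with
    | nil => simp
    | cons b es =>
      simp only [List.drop_succ_cons, List.drop_zero, List.zip_cons_cons, List.any_cons,
        Bool.or_eq_false_iff, beq_eq_false_iff_ne, ne_eq, List.isChain_cons_cons] at *
      exact and_congr Iff.rfl ih

lemma nodup_of_pairwise_chain (es : List (Int × Int))
    (hp : es.Pairwise (fun a b => lexB b a = false))
    (hc : es.IsChain (fun a b => a ≠ b)) : es.Nodup := by
  have hcle : es.IsChain (fun a b => lexB b a = false) := hp.isChain
  have hclt : es.IsChain (fun a b => lexB a b = true) := by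
    rw [List.isChain_iff_getElem] at hcle hc ⊢
    intro i hi
    exact lexB_total (hcle i hi) (hc i hi)
  haveI : Trans (fun (a b : Int × Int) => lexB a b = true)
      (fun (a b : Int × Int) => lexB a b = true)
      (fun (a b : Int × Int) => lexB a b = true) :=
    ⟨fun h1 h2 => lexB_trans h1 h2⟩
  have hplt : es.Pairwise (fun a b => lexB a b = true) :=
    List.isChain_iff_pairwise.mp hclt
  exact hplt.imp (fun {a b} hab => by
    intro heq
    rw [heq, lexB_irrefl] at hab
    exact Bool.false_ne_true hab)

-- max of a nonempty coordinate list is < c iff every coordinate is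
lemma max?_lt_iff {xs : List Int} {m : Int} (c : Int)
    (h : PySem.List.max? xs (fun v => v) = some m) :
    (m < c ↔ ∀ x ∈ xs, x < c) :=
  ⟨fun hm x hx => lt_of_le_of_lt (PySem.List.max?_isMax h x hx) hm,
   fun hall => hall m (PySem.List.max?_mem h)⟩

lemma valid_bipartite_graph_alt_eq_true_iff (nx ny : Int) (edges : List (Int × Int)) :
    valid_bipartite_graph_alt nx ny edges = true ↔
      ¬(nx < 0 ∨ ny < 0) ∧ edges.Nodup ∧ ∀ e ∈ edges, e.1 < nx ∧ e.2 < ny := by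
  unfold valid_bipartite_graph_alt
  by_cases hneg : (nx < 0 || ny < 0) = true
  · rw [if_pos hneg]
    simp only [Bool.or_eq_true, decide_eq_true_eq] at hneg
    simp [hneg]
  · rw [if_neg hneg]
    simp only [Bool.or_eq_true, decide_eq_true_eq] at hneg
    push Not at hneg
    by_cases hemp : edges.isEmpty
    · rw [if_pos hemp]
      rw [List.isEmpty_iff] at hemp
      subst hemp
      simp
      omega
    · rw [if_neg hemp]
      rw [Bool.not_eq_true, List.isEmpty_eq_false_iff_exists_mem] at hemp
      obtain ⟨e0, he0⟩ := hemp
      have hperm : (PySem.List.sorted2 edges Prod.fst Prod.snd).Perm edges :=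
        PySem.List.sorted2_perm edges Prod.fst Prod.snd false
      have hpw : (PySem.List.sorted2 edges Prod.fst Prod.snd).Pairwise
          (fun a b => lexB b a = false) := by
        rw [sorted2_eq_foldl]
        exact pairwise_foldl_insertBy edges [] (by simp)
      have hmx : ∃ mx, PySem.List.max? (edges.map (fun e => e.1)) (fun v => v) = some mx := by
        rcases hh : PySem.List.max? (edges.map (fun e => e.1)) (fun v => v) with _ | mx
        · rw [PySem.List.max?_eq_none_iff] at hh
          simp only [List.map_eq_nil_iff] at hh
          subst hh; simp at he0
        · exact ⟨mx, hh⟩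
      have hmy : ∃ my, PySem.List.max? (edges.map (fun e => e.2)) (fun v => v) = some my := by
        rcases hh : PySem.List.max? (edges.map (fun e => e.2)) (fun v => v) with _ | my
        · rw [PySem.List.max?_eq_none_iff] at hh
          simp only [List.map_eq_nil_iff] at hh
          subst hh; simp at he0
        · exact ⟨my, hh⟩
      obtain ⟨mx, hmx⟩ := hmx
      obtain ⟨my, hmy⟩ := hmy
      show (if ((PySem.List.sorted2 edges Prod.fst Prod.snd).zip
          ((PySem.List.sorted2 edges Prod.fst Prod.snd).drop 1)).any
          (fun p => p.1 == p.2) = true then false else _) = true ↔ _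
      cases hadj : ((PySem.List.sorted2 edges Prod.fst Prod.snd).zip
          ((PySem.List.sorted2 edges Prod.fst Prod.snd).drop 1)).any (fun p => p.1 == p.2)
      · rw [if_neg (by simp)]
        rw [hmx, hmy]
        have hnodup : edges.Nodup := by
          have hchain : (PySem.List.sorted2 edges Prod.fst Prod.snd).IsChain (· ≠ ·) :=
            (zip_any_eq_false_iff_isChain _).mp hadj
          exact (nodup_of_pairwise_chain _ hpw hchain).perm hperm
        simp only [Bool.and_eq_true, decide_eq_true_eq]
        rw [max?_lt_iff nx hmx, max?_lt_iff ny hmy]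
        constructor
        · rintro ⟨h1, h2⟩
          refine ⟨by omega, hnodup, fun e he => ⟨?_, ?_⟩⟩
          · exact h1 e.1 (List.mem_map.mpr ⟨e, he, rfl⟩)
          · exact h2 e.2 (List.mem_map.mpr ⟨e, he, rfl⟩)
        · rintro ⟨-, -, hall⟩
          constructor
          · intro v hv
            obtain ⟨e, he, rfl⟩ := List.mem_map.mp hv
            exact (hall e he).1
          · intro v hv
            obtain ⟨e, he, rfl⟩ := List.mem_map.mp hv
            exact (hall e he).2
      · rw [if_pos rfl]
        simp only [Bool.false_eq_true, false_iff, not_and]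
        intro _ hnd _
        have hnds : (PySem.List.sorted2 edges Prod.fst Prod.snd).Nodup := hnd.perm hperm.symm
        have : ((PySem.List.sorted2 edges Prod.fst Prod.snd).zip
            ((PySem.List.sorted2 edges Prod.fst Prod.snd).drop 1)).any
            (fun p => p.1 == p.2) = false :=
          (zip_any_eq_false_iff_isChain _).mpr (hnds.isChain.imp (fun {a b} h => h))
        rw [this] at hadj
        simp at hadj

-- ===== VERDICT (by name: the statement is the Claim_ definition above) =====
theorem valid_bipartite_graph_spec : Claim_equal_valid_bipartite_graph := by
  intro nx ny edges _
  unfold Spec_valid_bipartite_graph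
  rw [Bool.eq_iff_iff, valid_bipartite_graph_eq_true_iff, valid_bipartite_graph_alt_eq_true_iff]
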